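-- pv_equiv track=rewrite | github.com/SaikySu/Sign-Language-Recognition-System | sign_reader_yolo.py | build_letter_set
-- ===== SOURCE A (Python) =====
-- from typing import List, Tuple, Optional
--
-- def build_letter_set(model_names: dict, explicit_letters: Optional[str]) -> set:
--     if explicit_letters:
--         raw = [s.strip() for s in explicit_letters.split(',') if s.strip()]
--         return set(raw)
--     letters = set()
--     for _, name in model_names.items():
--         if len(name) == 1 and name.isalpha():
--             letters.add(name.upper())
--     if not letters:
--         for _, name in model_names.items():
--             short = name.split('_')[0]
--             if len(short) == 1 and short.isalpha():
--                 letters.add(short.upper())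
--     return letters
-- ===== SOURCE B (Python) =====
-- def build_letter_set(model_names: dict, explicit_letters):
--     if explicit_letters:
--         raw = [s.strip() for s in explicit_letters.split(',') if s.strip()]
--         return set(raw)
--     # Best-rank selection: rank 0 = the name itself is a single letter,
--     # rank 1 = its prefix before '_' is.  Keep only letters of the best
--     # (lowest) rank seen so far, resetting the set whenever a better rank appears.
--     best = 2
--     chosen = set()
--     for name in model_names.values():
--         for rank, cand in ((0, name), (1, name.split('_')[0])):
--             if len(cand) == 1 and cand.isalpha():
--                 if rank < best:
--                     best = rank
--                     chosen = {cand.upper()}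
--                 elif rank == best:
--                     chosen.add(cand.upper())
--     return chosen
-- ===== Notes on version B (the rewrite author's own statement) =====
-- stated objective: alternative
-- what changed: Replaces A's staged scheme (collect exact single-letter names, then rescan for underscore-prefix fallbacks only if none were found) with a best-rank selection: each name yields ranked candidates (0 = the name itself, 1 = its '_'-prefix) and one argmin-with-ties pass keeps only the letters of the lowest rank seen, resetting the set when a better rank appears.
import Mathlib
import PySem

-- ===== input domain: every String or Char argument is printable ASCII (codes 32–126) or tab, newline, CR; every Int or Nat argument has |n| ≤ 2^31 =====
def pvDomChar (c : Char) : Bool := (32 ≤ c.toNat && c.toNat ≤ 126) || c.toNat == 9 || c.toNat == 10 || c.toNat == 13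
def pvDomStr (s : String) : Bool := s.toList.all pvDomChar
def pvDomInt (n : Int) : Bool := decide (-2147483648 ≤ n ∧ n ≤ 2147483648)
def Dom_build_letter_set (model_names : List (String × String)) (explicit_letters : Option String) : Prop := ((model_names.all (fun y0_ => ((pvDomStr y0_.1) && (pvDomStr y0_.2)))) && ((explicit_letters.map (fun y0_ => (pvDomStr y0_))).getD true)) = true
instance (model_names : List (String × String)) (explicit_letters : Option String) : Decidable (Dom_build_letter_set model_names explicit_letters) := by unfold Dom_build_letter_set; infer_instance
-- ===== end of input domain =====

-- B replaces A's staged two-pass fallback with a single best-rank (argmin-with-ties)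
-- selection over ranked candidates (objective: alternative; same cost).

-- helpers shared by both ports (the same Python expressions appear in A and B)
def pvIsLetter (s : String) : Bool := decide (PySem.Str.len s = 1) && PySem.Str.strIsalpha s
def pvShort (s : String) : String := ((PySem.Str.split? s "_").getD []).headD ""

-- ===== PORT A =====
-- literal port of A: explicit-letters branch, the exact-letters loop, then the
-- conditional second full scan for '_'-prefix fallback letters.
def pvStepExact (letters : List String) (p : String × String) : List String :=
  if pvIsLetter p.2 then PySem.Set.add letters (PySem.Str.upper p.2) else letters

def pvStepShort (letters : List String) (p : String × String) : List String :=
  if pvIsLetter (pvShort p.2) then PySem.Set.add letters (PySem.Str.upper (pvShort p.2)) else letters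

def build_letter_set (model_names : List (String × String)) (explicit_letters : Option String) : List String :=
  if (explicit_letters.getD "") ≠ "" then
    let raw := ((PySem.Str.split? (explicit_letters.getD "") ",").getD []).filterMap
      (fun s => if PySem.Str.strip s ≠ "" then some (PySem.Str.strip s) else none)
    PySem.Set.ofList raw
  else
    let letters := model_names.foldl pvStepExact PySem.Set.empty
    if letters = [] then model_names.foldl pvStepShort letters
    else letters

-- ===== PORT B =====
-- literal port of B: one argmin-with-ties pass over ranked candidates
-- ((0, name), (1, name.split('_')[0])) keeping (best, chosen).
def pvRankStep (st : Int × List String) (rc : Int × String) : Int × List String :=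
  if pvIsLetter rc.2 then
    if rc.1 < st.1 then (rc.1, PySem.Set.ofList [PySem.Str.upper rc.2])
    else if rc.1 = st.1 then (st.1, PySem.Set.add st.2 (PySem.Str.upper rc.2))
    else st
  else st

def pvNameStep (st : Int × List String) (p : String × String) : Int × List String :=
  [((0 : Int), p.2), (1, pvShort p.2)].foldl pvRankStep st

def build_letter_set_alt (model_names : List (String × String)) (explicit_letters : Option String) : List String :=
  if (explicit_letters.getD "") ≠ "" then
    let raw := ((PySem.Str.split? (explicit_letters.getD "") ",").getD []).filterMap
      (fun s => if PySem.Str.strip s ≠ "" then some (PySem.Str.strip s) else none)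
    PySem.Set.ofList raw
  else
    (model_names.foldl pvNameStep ((2 : Int), PySem.Set.empty)).2

-- ===== PRECONDITION & SPEC =====
def Spec_build_letter_set (model_names : List (String × String)) (explicit_letters : Option String) (out : List String) : Prop := out = build_letter_set_alt model_names explicit_letters
instance (model_names : List (String × String)) (explicit_letters : Option String) (out : List String) : Decidable (Spec_build_letter_set model_names explicit_letters out) := by unfold Spec_build_letter_set; infer_instance

-- ===== CLAIM (what is proved, stated in full; the proofs are below) =====
def Claim_equal_build_letter_set : Prop := ∀ (model_names : List (String × String)) (explicit_letters : Option String), Dom_build_letter_set model_names explicit_letters → Spec_build_letter_set model_names explicit_letters (build_letter_set model_names explicit_letters)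

-- ===== LEMMAS AND PROOFS =====

theorem pv_add_ne_nil (s : List String) (x : String) : PySem.Set.add s x ≠ [] := by
  unfold PySem.Set.add
  split_ifs with h
  · intro hn; subst hn; simp [PySem.Set.contains] at h
  · simp

theorem pv_foldExact_ne_nil (xs : List (String × String)) (l : List String) (h : l ≠ []) :
    xs.foldl pvStepExact l ≠ [] := by
  induction xs generalizing l with
  | nil => exact h
  | cons p ps ih =>
    simp only [List.foldl_cons]
    apply ih
    unfold pvStepExact; split_ifs with _
    · exact pv_add_ne_nil _ _
    · exact h

theorem pv_foldShort_ne_nil (xs : List (String × String)) (l : List String) (h : l ≠ []) :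
    xs.foldl pvStepShort l ≠ [] := by
  induction xs generalizing l with
  | nil => exact h
  | cons p ps ih =>
    simp only [List.foldl_cons]
    apply ih
    unfold pvStepShort; split_ifs with _
    · exact pv_add_ne_nil _ _
    · exact h

-- once best = 0, B accumulates exactly A's exact-letter fold
theorem pv_fold_best0 (xs : List (String × String)) (l : List String) :
    xs.foldl pvNameStep (0, l) = (0, xs.foldl pvStepExact l) := by
  induction xs generalizing l with
  | nil => rfl
  | cons p ps ih =>
    simp only [List.foldl_cons]
    have hstep : pvNameStep (0, l) p = (0, pvStepExact l p) := by
      unfold pvNameStep pvRankStep pvStepExact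
      simp only [List.foldl_cons, List.foldl_nil]
      split_ifs <;> simp_all
    rw [hstep, ih]

-- with best = 1, B either resets on the first exact letter or accumulates A's fallback fold
theorem pv_fold_best1 (xs : List (String × String)) (f : List String) :
    xs.foldl pvNameStep (1, f) =
      if xs.foldl pvStepExact [] = [] then (1, xs.foldl pvStepShort f)
      else (0, xs.foldl pvStepExact []) := by
  induction xs generalizing f with
  | nil => rfl
  | cons p ps ih =>
    simp only [List.foldl_cons]
    by_cases hA : pvIsLetter p.2
    · have hstep : pvNameStep (1, f) p = (0, [PySem.Str.upper p.2]) := by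
        norm_num [pvNameStep, pvRankStep, hA, PySem.Set.ofList, PySem.Set.add, PySem.Set.contains]
      have hA' : pvStepExact [] p = [PySem.Str.upper p.2] := by
        unfold pvStepExact
        simp [hA, PySem.Set.add, PySem.Set.contains]
      rw [hstep, pv_fold_best0, hA',
        if_neg (pv_foldExact_ne_nil ps [PySem.Str.upper p.2] (by simp))]
    · have hstep : pvNameStep (1, f) p = (1, pvStepShort f p) := by
        norm_num [pvNameStep, pvRankStep, pvStepShort, hA]
        split_ifs <;> rfl
      have hA' : pvStepExact [] p = [] := by unfold pvStepExact; simp [hA]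
      rw [hstep, ih, hA']

-- full invariant from the initial state (2, ∅)
theorem pv_fold_best2 (xs : List (String × String)) :
    xs.foldl pvNameStep (2, PySem.Set.empty) =
      if xs.foldl pvStepExact [] = [] then
        (if xs.foldl pvStepShort [] = [] then ((2 : Int), ([] : List String))
         else (1, xs.foldl pvStepShort []))
      else (0, xs.foldl pvStepExact []) := by
  induction xs with
  | nil => rfl
  | cons p ps ih =>
    simp only [List.foldl_cons]
    by_cases hA : pvIsLetter p.2
    · have hstep : pvNameStep (2, PySem.Set.empty) p = (0, [PySem.Str.upper p.2]) := by
        norm_num [pvNameStep, pvRankStep, hA, PySem.Set.ofList, PySem.Set.add, PySem.Set.contains]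
      have hA' : pvStepExact [] p = [PySem.Str.upper p.2] := by
        unfold pvStepExact; simp [hA, PySem.Set.add, PySem.Set.contains]
      rw [hstep, pv_fold_best0, hA',
        if_neg (pv_foldExact_ne_nil ps [PySem.Str.upper p.2] (by simp))]
    · by_cases hS : pvIsLetter (pvShort p.2)
      · have hstep : pvNameStep (2, PySem.Set.empty) p = (1, [PySem.Str.upper (pvShort p.2)]) := by
          norm_num [pvNameStep, pvRankStep, hA, hS, PySem.Set.ofList, PySem.Set.add, PySem.Set.contains]
        have hA' : pvStepExact [] p = [] := by unfold pvStepExact; simp [hA]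
        have hS' : pvStepShort [] p = [PySem.Str.upper (pvShort p.2)] := by
          unfold pvStepShort; simp [hS, PySem.Set.add, PySem.Set.contains]
        rw [hstep, pv_fold_best1, hA', hS',
          if_neg (pv_foldShort_ne_nil ps [PySem.Str.upper (pvShort p.2)] (by simp))]
      · have hstep : pvNameStep (2, PySem.Set.empty) p = (2, PySem.Set.empty) := by
          norm_num [pvNameStep, pvRankStep, hA, hS]
        have hA' : pvStepExact [] p = [] := by unfold pvStepExact; simp [hA]
        have hS' : pvStepShort [] p = [] := by unfold pvStepShort; simp [hS]
        rw [hstep, ih, hA', hS']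

-- ===== VERDICT (by name: the statement is the Claim_ definition above) =====
theorem build_letter_set_spec : Claim_equal_build_letter_set := by
  intro model_names explicit_letters _
  unfold Spec_build_letter_set build_letter_set build_letter_set_alt
  by_cases h : (explicit_letters.getD "") ≠ ""
  · rw [if_pos h, if_pos h]
  · rw [if_neg h, if_neg h, pv_fold_best2]
    by_cases hA : model_names.foldl pvStepExact PySem.Set.empty = []
    · rw [if_pos hA]
      have hA0 : model_names.foldl pvStepExact ([] : List String) = [] := hA
      rw [if_pos hA0]
      by_cases hS : model_names.foldl pvStepShort ([] : List String) = []
      · rw [if_pos hS]; rw [hA]; exact hS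
      · rw [if_neg hS]; rw [hA]
    · rw [if_neg hA]
      have hA0 : model_names.foldl pvStepExact ([] : List String) ≠ [] := hA
      rw [if_neg hA0]
      rfl
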